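-- pv_equiv track=rewrite | github.com/elahe-dastan/data-scientist-interview | picnic/sum-digit-fibonacci.py | solution
-- ===== SOURCE A (Python) =====
-- def digits_sum(n: int) -> int:
--     s = 0
--     while n > 0:
--         s += n % 10
--         n = n // 10
--     return s
--
-- def solution(n: int) -> int:
--     a = 0  # even squence
--     b = 1  # odd squence
--     for i in range(2, n):
--         if i % 2 == 0:
--             a = digits_sum(a) + digits_sum(b)
--         else:
--             b = digits_sum(a) + digits_sum(b)
--     if n % 2 == 0:
--         return a
--     return b
-- ===== SOURCE B (Python) =====
-- # The iterated digit-sum state is eventually periodic: for n >= 5 the answer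
-- # repeats with period 24, so B answers by table lookup in O(1).
-- _TABLE = (2, 3, 5, 8, 13, 12, 7, 10, 8, 9, 17, 17, 16, 15, 13, 10, 5, 6, 11, 8, 10, 9, 10, 10)
--
-- def solution(n: int) -> int:
--     if n >= 5:
--         return _TABLE[(n - 5) % 24]
--     if n == 4:
--         return 1
--     return n % 2
-- ===== Notes on version B (the rewrite author's own statement) =====
-- stated objective: faster
-- what changed: B replaces A's O(n) loop of iterated digit sums by an O(1) lookup in the precomputed period-24 table of the eventually periodic sequence (periodic from n = 5), plus the five small base cases.
import Mathlib
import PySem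

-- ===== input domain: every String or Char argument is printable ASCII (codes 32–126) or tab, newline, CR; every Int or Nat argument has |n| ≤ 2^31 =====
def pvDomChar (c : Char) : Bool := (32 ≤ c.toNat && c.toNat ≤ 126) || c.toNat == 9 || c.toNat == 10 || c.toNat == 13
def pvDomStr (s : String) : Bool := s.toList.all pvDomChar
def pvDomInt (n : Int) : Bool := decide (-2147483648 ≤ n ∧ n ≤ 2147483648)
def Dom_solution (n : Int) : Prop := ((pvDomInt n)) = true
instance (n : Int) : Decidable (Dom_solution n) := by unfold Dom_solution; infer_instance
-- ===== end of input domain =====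

-- B answers by a precomputed period-24 table (the sequence is periodic from n = 5); O(1) vs A's O(n) loop.

-- ===== PORT A =====
-- while n > 0: s += n % 10; n = n // 10   (fuel n.toNat bounds the iteration count; the guard 'n > 0' is A's)
def digitsSumAux : Nat → Int → Int → Int
  | 0, _, s => s
  | fuel + 1, n, s =>
      if n > 0 then digitsSumAux fuel (PySem.Int.floordiv n 10) (s + PySem.Int.mod n 10) else s

def digitsSum (n : Int) : Int := digitsSumAux n.toNat n 0

-- one iteration of A's for-loop body (branch order as in A)
def solStep (ab : Int × Int) (i : Int) : Int × Int :=
  if PySem.Int.mod i 2 == 0 then (digitsSum ab.1 + digitsSum ab.2, ab.2)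
  else (ab.1, digitsSum ab.1 + digitsSum ab.2)

def solution (n : Int) : Int :=
  let ab := (PySem.List.pyRange 2 n 1).foldl solStep (0, 1)
  if PySem.Int.mod n 2 == 0 then ab.1 else ab.2

-- ===== PORT B =====
def pvTable : List Int := [2, 3, 5, 8, 13, 12, 7, 10, 8, 9, 17, 17, 16, 15, 13, 10, 5, 6, 11, 8, 10, 9, 10, 10]

def solution_alt (n : Int) : Int :=
  if n ≥ 5 then PySem.List.pyGetD pvTable (PySem.Int.mod (n - 5) 24) 0  -- index is always in [0,24), default unused; exact
  else if n = 4 then 1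
  else PySem.Int.mod n 2

-- ===== PRECONDITION & SPEC =====
def Spec_solution (n : Int) (out : Int) : Prop := out = solution_alt n
instance (n : Int) (out : Int) : Decidable (Spec_solution n out) := by unfold Spec_solution; infer_instance

-- ===== CLAIM (what is proved, stated in full; the proofs are below) =====
def Claim_equal_solution : Prop := ∀ (n : Int), Dom_solution n → Spec_solution n (solution n)

-- ===== LEMMAS AND PROOFS =====

-- the loop state of A after processing indices 2..n-1
def S (n : Int) : Int × Int := (PySem.List.pyRange 2 n 1).foldl solStep (0, 1)

theorem S_succ (n : Int) (h : 2 ≤ n) : S (n + 1) = solStep (S n) n := by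
  unfold S
  rw [PySem.List.pyRange_one_succ_right h, List.foldl_append]
  rfl

theorem solStep_per (ab : Int × Int) (i : Int) : solStep ab (i + 24) = solStep ab i := by
  have h : ((2:Int) ∣ i + 24) ↔ (2 ∣ i) := by omega
  simp [solStep, h]

theorem S_per (k : Nat) : S (5 + (k : Int) + 24) = S (5 + (k : Int)) := by
  induction k with
  | zero => decide
  | succ k ih =>
      have h1 : (5 : Int) + (k + 1 : Nat) + 24 = (5 + (k : Int) + 24) + 1 := by push_cast; ring
      have h2 : (5 : Int) + (k + 1 : Nat) = (5 + (k : Int)) + 1 := by push_cast; ring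
      rw [h1, h2, S_succ _ (by omega), S_succ _ (by omega), ih]
      have h3 : (5 : Int) + k + 24 = (5 + (k : Int)) + 24 := by ring
      rw [h3, solStep_per]

theorem S_mod (m : Nat) : S (5 + (m : Int)) = S (5 + ((m % 24 : Nat) : Int)) := by
  induction m using Nat.strong_induction_on with
  | _ m ih =>
    by_cases h : m < 24
    · rw [Nat.mod_eq_of_lt h]
    · have e : m = (m - 24) + 24 := by omega
      have : (5 : Int) + (m : Int) = 5 + ((m - 24 : Nat) : Int) + 24 := by omega
      rw [this, S_per, ih (m - 24) (by omega)]
      congr 1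
      omega

theorem table_val (r : Fin 24) :
    (if PySem.Int.mod (5 + (r : Int)) 2 == 0 then (S (5 + (r : Int))).1 else (S (5 + (r : Int))).2)
      = PySem.List.pyGetD pvTable ((r : Int)) 0 := by
  revert r
  decide

-- ===== VERDICT (by name: the statement is the Claim_ definition above) =====
theorem solution_spec : Claim_equal_solution := by
  intro n _
  unfold Spec_solution
  by_cases h5 : 5 ≤ n
  · -- periodic regime
    obtain ⟨m, hm⟩ : ∃ m : Nat, n = 5 + (m : Int) := ⟨(n - 5).toNat, by omega⟩
    subst hm
    have hsol : solution (5 + (m : Int)) =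
        (if PySem.Int.mod (5 + (m : Int)) 2 == 0 then (S (5 + (m : Int))).1 else (S (5 + (m : Int))).2) := rfl
    have hpar : PySem.Int.mod (5 + (m : Int)) 2 = PySem.Int.mod (5 + ((m % 24 : Nat) : Int)) 2 := by
      rw [PySem.Int.mod_eq_emod_of_pos (by norm_num), PySem.Int.mod_eq_emod_of_pos (by norm_num)]
      omega
    have hidx : PySem.Int.mod ((5 + (m : Int)) - 5) 24 = ((m % 24 : Nat) : Int) := by
      have : (5 + (m : Int)) - 5 = (m : Int) := by ring
      rw [this]
      exact_mod_cast PySem.Int.mod_natCast m 24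
    rw [hsol, S_mod, hpar]
    have halt : solution_alt (5 + (m : Int)) = PySem.List.pyGetD pvTable ((m % 24 : Nat) : Int) 0 := by
      unfold solution_alt
      rw [if_pos (by omega), hidx]
    rw [halt]
    exact table_val ⟨m % 24, Nat.mod_lt _ (by norm_num)⟩
  · -- base cases n < 5
    by_cases h2 : n < 2
    · have hr : PySem.List.pyRange 2 n 1 = [] := PySem.List.pyRange_one_eq_nil (by omega)
      have hm0 : 0 ≤ PySem.Int.mod n 2 := PySem.Int.mod_nonneg n (by norm_num)
      have hm1 : PySem.Int.mod n 2 < 2 := PySem.Int.mod_lt n (by norm_num)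
      have halt : solution_alt n = PySem.Int.mod n 2 := by
        unfold solution_alt
        rw [if_neg (by omega), if_neg (by omega)]
      have hsol : solution n = if PySem.Int.mod n 2 == 0 then (0:Int) else 1 := by
        unfold solution
        rw [hr]
        rfl
      rw [hsol, halt]
      by_cases hz : PySem.Int.mod n 2 = 0
      · rw [hz]
        decide
      · have h1 : PySem.Int.mod n 2 = 1 := by omega
        rw [h1]
        decide
    · interval_cases n <;> decide
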